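-- pv_equiv track=rewrite | github.com/linkedin/greykite | greykite/detection/detector/ad_utils.py | add_new_params_to_records
-- ===== SOURCE A (Python) =====
-- def add_new_params_to_records(
--         new_params,
--         records=None):
--     """For a list of records (each being a `dict`) and a set of parameters
--     each having a list of potential values, it expands each record in all possible
--     ways based on all possible values for each param in ``new_params``.
--     Then it returns all possible augmented records in a list.
--
--     Parameters
--     ----------
--     new_params : `dict` {`str`: `list`}
--         A dictionary with keys representing (new) variables and values for each
--         key being the possible values for that variable.
--     records : `list` [`dict`] or None, default None
--         List of existing records which are to be augmented with all possible
--         combinations of the new variables. If None, it is assigned to ``[{}]``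
--         which means we start from an empty record.
--
--     Returns
--     -------
--     expanded_records : `list` [`dict`]
--         The resulting list of augmented records.
--     """
--     if records is None:
--         records = [{}]
--
--     def add_new_param_values(name, values, records):
--         # `records` is a list and it is copied so that its not altered
--         # Note that `deepcopy` is not possible for lists
--         # Therefore inside the for loop we copy each param (`dict`)
--         records = records.copy()
--         expanded_records = []
--         for param in records:
--             for v in values:
--                 # Copies to avoid over-write
--                 expanded_param = param.copy()
--                 expanded_param.update({name: v})
--                 expanded_records.append(expanded_param)
--         return expanded_records
--
--     expanded_records = records.copy()
--     for name, values in new_params.items():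
--         expanded_records = add_new_param_values(
--             name=name,
--             values=values,
--             records=expanded_records)
--
--     return expanded_records
-- ===== SOURCE B (Python) =====
-- import itertools
--
--
-- def add_new_params_to_records(
--         new_params,
--         records=None):
--     if records is None:
--         records = [{}]
--     if not new_params:
--         return records.copy()
--     names = list(new_params)
--     value_lists = list(new_params.values())
--     expanded_records = []
--     for record in records:
--         for combo in itertools.product(*value_lists):
--             new_record = record.copy()
--             new_record.update(dict(zip(names, combo)))
--             expanded_records.append(new_record)
--     return expanded_records
-- ===== Notes on version B (the rewrite author's own statement) =====
-- stated objective: simpler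
-- what changed: Replaces the staged per-parameter re-expansion (rebuilding the whole record list once per parameter) by one flat pass: each record is combined with each tuple of itertools.product over all value lists at once.
import Mathlib
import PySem

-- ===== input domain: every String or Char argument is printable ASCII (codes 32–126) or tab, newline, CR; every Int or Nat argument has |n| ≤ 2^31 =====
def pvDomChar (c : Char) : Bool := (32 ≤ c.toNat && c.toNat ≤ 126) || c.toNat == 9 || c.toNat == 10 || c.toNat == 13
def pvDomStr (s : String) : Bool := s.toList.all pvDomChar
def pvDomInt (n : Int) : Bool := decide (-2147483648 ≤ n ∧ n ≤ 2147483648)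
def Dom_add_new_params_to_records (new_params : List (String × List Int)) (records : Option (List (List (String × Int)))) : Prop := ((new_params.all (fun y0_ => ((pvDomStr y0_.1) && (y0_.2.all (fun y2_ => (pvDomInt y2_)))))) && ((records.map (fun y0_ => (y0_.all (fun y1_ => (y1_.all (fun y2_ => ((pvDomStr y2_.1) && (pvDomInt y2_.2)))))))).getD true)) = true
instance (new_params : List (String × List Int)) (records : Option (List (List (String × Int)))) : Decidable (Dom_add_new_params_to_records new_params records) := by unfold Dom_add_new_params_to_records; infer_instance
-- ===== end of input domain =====

-- B replaces A's staged per-parameter re-expansion by one flat pass over the full Cartesian product of value lists (objective: simpler decomposition; return value only — neither version mutates its inputs).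


-- ===== PORT A =====
-- dict.copy(); d[name]=v  (Python update: overwrite in place, new key appends) — shared primitive
def pvUpdate (d : List (String × Int)) (k : String) (v : Int) : List (String × Int) :=
  ((PySem.Dict.mk d).insert k v).items

-- Port of A: staged expansion, re-expanding the whole record list once per parameter.
def pvAddNewParamValues (name : String) (values : List Int) (records : List (List (String × Int))) : List (List (String × Int)) :=
  records.foldl
    (fun expanded_records param =>
      values.foldl
        (fun acc v => acc ++ [pvUpdate param name v])
        expanded_records)
    []

def add_new_params_to_records (new_params : List (String × List Int)) (records : Option (List (List (String × Int)))) : List (List (String × Int)) :=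
  let records := records.getD [[]]
  new_params.foldl
    (fun expanded_records p => pvAddNewParamValues p.1 p.2 expanded_records)
    records

-- ===== PORT B =====
-- Port of B: one flat pass over the Cartesian product of all value lists (itertools.product).
def pvProduct : List (List Int) → List (List Int)
  | [] => [[]]
  | vs :: rest => vs.flatMap (fun v => (pvProduct rest).map (fun c => v :: c))

def add_new_params_to_records_alt (new_params : List (String × List Int)) (records : Option (List (List (String × Int)))) : List (List (String × Int)) :=
  let records := records.getD [[]]
  if new_params.isEmpty then records
  else
    let names := new_params.map Prod.fst
    let combos := pvProduct (new_params.map Prod.snd)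
    records.flatMap (fun record =>
      combos.map (fun combo =>
        (names.zip combo).foldl (fun d kv => pvUpdate d kv.1 kv.2) record))

-- ===== PRECONDITION & SPEC =====
def Spec_add_new_params_to_records (new_params : List (String × List Int)) (records : Option (List (List (String × Int)))) (out : List (List (String × Int))) : Prop := out = add_new_params_to_records_alt new_params records
instance (new_params : List (String × List Int)) (records : Option (List (List (String × Int)))) (out : List (List (String × Int))) : Decidable (Spec_add_new_params_to_records new_params records out) := by unfold Spec_add_new_params_to_records; infer_instance

-- ===== CLAIM (what is proved, stated in full; the proofs are below) =====
def Claim_equal_add_new_params_to_records : Prop := ∀ (new_params : List (String × List Int)) (records : Option (List (List (String × Int)))), Dom_add_new_params_to_records new_params records → Spec_add_new_params_to_records new_params records (add_new_params_to_records new_params records)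

-- ===== LEMMAS AND PROOFS =====

-- ===== VERDICT (by name: the statement is the Claim_ definition above) =====
lemma foldl_append_singleton (f : Int → List (String × Int)) (values : List Int) :
    ∀ (a : List (List (String × Int))),
      values.foldl (fun a v => a ++ [f v]) a = a ++ values.map f := by
  induction values with
  | nil => simp
  | cons v vs ih => intro a; simp [ih, List.append_assoc]

-- pvAddNewParamValues is one-level flat expansion
lemma pvANPV_flat (name : String) (values : List Int) (records : List (List (String × Int))) :
    pvAddNewParamValues name values records
      = records.flatMap (fun p => values.map (fun v => pvUpdate p name v)) := by
  unfold pvAddNewParamValues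
  suffices h : ∀ (acc : List (List (String × Int))),
      records.foldl (fun er param => values.foldl (fun a v => a ++ [pvUpdate param name v]) er) acc
        = acc ++ records.flatMap (fun p => values.map (fun v => pvUpdate p name v)) by
    simpa using h []
  induction records with
  | nil => simp
  | cons p rest ih =>
    intro acc
    rw [List.foldl_cons, ih, foldl_append_singleton]
    simp [List.flatMap_cons, List.append_assoc]

-- staged expansion over all params = flat pass over the full product
lemma staged_eq_flat (new_params : List (String × List Int)) (records : List (List (String × Int))) :
    new_params.foldl (fun er p => pvAddNewParamValues p.1 p.2 er) records
      = records.flatMap (fun r =>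
          (pvProduct (new_params.map Prod.snd)).map (fun combo =>
            ((new_params.map Prod.fst).zip combo).foldl
              (fun d kv => pvUpdate d kv.1 kv.2) r)) := by
  induction new_params generalizing records with
  | nil => simp [pvProduct]
  | cons p rest ih =>
    rw [List.foldl_cons, ih, pvANPV_flat]
    simp [pvProduct, List.flatMap_assoc, List.map_flatMap, List.flatMap_map, Function.comp_def,
      List.zip_cons_cons, List.foldl_cons]

theorem add_new_params_to_records_spec : Claim_equal_add_new_params_to_records := by
  intro new_params records _
  unfold Spec_add_new_params_to_records add_new_params_to_records add_new_params_to_records_alt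
  by_cases h : new_params.isEmpty
  · rcases List.isEmpty_iff.mp h with rfl; simp
  · simp only [h, if_neg, Bool.false_eq_true, not_false_iff]
    exact staged_eq_flat new_params (records.getD [[]])
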